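-- pv_equiv track=rewrite | github.com/ajaanbaahu/twitcoin | app/views.py | score_tweet
-- ===== SOURCE A (Python) =====
-- def score_tweet(tweet, word_scores):
--   tweet = (tweet)
--   score = 0
--   try:
--     tweet_text = tweet
--     for word in tweet_text.split(' '):
--       try:
--         score += word_scores[word]
--       except KeyError:
--         pass
--     #scored_tweet = Tweet(text=tweet_text, score=score).save()
--   except KeyError:
--     pass
--   return score
-- ===== SOURCE B (Python) =====
-- def score_tweet(tweet, word_scores):
--     counts = {}
--     for w in tweet.split(' '):
--         counts[w] = counts.get(w, 0) + 1
--     return sum(c * word_scores[w] for w, c in counts.items() if w in word_scores)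
-- ===== Notes on version B (the rewrite author's own statement) =====
-- stated objective: alternative
-- what changed: B tabulates word occurrences in a frequency dict first and then sums count*score over distinct words, instead of A's per-occurrence addition inside a try/except; the dead outer try/except is dropped.
import Mathlib
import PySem

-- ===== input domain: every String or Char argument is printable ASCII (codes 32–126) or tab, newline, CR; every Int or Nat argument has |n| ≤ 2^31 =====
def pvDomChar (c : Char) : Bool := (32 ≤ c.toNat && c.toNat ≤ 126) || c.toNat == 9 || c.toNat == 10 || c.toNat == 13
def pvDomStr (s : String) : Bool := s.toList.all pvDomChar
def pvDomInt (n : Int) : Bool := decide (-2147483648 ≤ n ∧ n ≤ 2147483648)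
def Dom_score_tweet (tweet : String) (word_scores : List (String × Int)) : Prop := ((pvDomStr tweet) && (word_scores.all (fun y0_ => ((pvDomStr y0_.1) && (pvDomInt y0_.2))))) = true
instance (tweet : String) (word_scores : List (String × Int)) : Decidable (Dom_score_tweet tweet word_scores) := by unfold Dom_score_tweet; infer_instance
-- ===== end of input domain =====

-- B replaces A's per-occurrence additions (inside a dead try/except) with a word-frequency
-- table built first, then one pass over distinct words adding count * score (objective: alternative).

-- ===== PORT A =====
-- for word in tweet.split(' '): score += word_scores[word], KeyError ignored
def score_tweet (tweet : String) (word_scores : List (String × Int)) : Int :=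
  ((PySem.Str.split? tweet " ").getD []).foldl
    (fun score word =>
      match (PySem.Dict.mk word_scores).get? word with
      | some v => score + v
      | none => score) 0

-- ===== PORT B =====
-- counts[w] = counts.get(w, 0) + 1 loop, then sum(c * word_scores[w] for w, c in counts.items() if w in word_scores)
def score_tweet_alt (tweet : String) (word_scores : List (String × Int)) : Int :=
  let counts : PySem.Dict String Int :=
    ((PySem.Str.split? tweet " ").getD []).foldl
      (fun d w => d.insert w (d.getD w 0 + 1)) PySem.Dict.empty
  counts.items.foldl
    (fun acc p =>
      if (PySem.Dict.mk word_scores).contains p.1 then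
        acc + p.2 * ((PySem.Dict.mk word_scores).getD p.1 0)
      else acc) 0

-- ===== PRECONDITION & SPEC =====
def Spec_score_tweet (tweet : String) (word_scores : List (String × Int)) (out : Int) : Prop := out = score_tweet_alt tweet word_scores
instance (tweet : String) (word_scores : List (String × Int)) (out : Int) : Decidable (Spec_score_tweet tweet word_scores out) := by unfold Spec_score_tweet; infer_instance

-- ===== CLAIM (what is proved, stated in full; the proofs are below) =====
def Claim_equal_score_tweet : Prop := ∀ (tweet : String) (word_scores : List (String × Int)), Dom_score_tweet tweet word_scores → Spec_score_tweet tweet word_scores (score_tweet tweet word_scores)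

-- ===== LEMMAS AND PROOFS =====

-- a per-occurrence sum equals the sum over distinct elements weighted by multiplicity
lemma sum_map_eq_sum_dedup_count (g : String → Int) (l : List String) :
    (l.map g).sum = ((PySem.Set.ofList l).map (fun k => (l.count k : Int) * g k)).sum := by
  have h1 : (l.map g).sum = ∑ m ∈ l.toFinset, l.count m • g m := by
    simpa using Finset.sum_multiset_map_count (↑l : Multiset String) g
  have h2 : ((PySem.Set.ofList l).map (fun k => (l.count k : Int) * g k)).sum
      = ∑ m ∈ (PySem.Set.ofList l : List String).toFinset, (l.count m : Int) * g m :=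
    (List.sum_toFinset _ (PySem.Set.nodup_ofList l)).symm
  have h3 : (PySem.Set.ofList l : List String).toFinset = l.toFinset := by
    ext x; simp [PySem.Set.mem_ofList]
  rw [h1, h2, h3]
  refine Finset.sum_congr rfl (fun m _ => ?_)
  simp

theorem score_tweet_spec : Claim_equal_score_tweet := by
  intro tweet ws _
  unfold Spec_score_tweet score_tweet score_tweet_alt
  set words := (PySem.Str.split? tweet " ").getD [] with hw
  set d := PySem.Dict.mk ws with hd
  -- A side: per-occurrence additions are a sum over words
  rw [PySem.List.foldl_congr_mem words _ (fun acc w => acc + d.getD w 0) 0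
    (by
      intro acc w _
      cases h : d.get? w <;>
        simp [PySem.Dict.getD_eq_get?_getD, h])]
  -- B side: the count loop is Counter, its items are distinct words with multiplicities
  simp only [PySem.Dict.foldl_insert_getD_add_one_eq_counter, PySem.Dict.items_counter]
  rw [PySem.List.foldl_congr_mem
    (List.map (fun k => (k, (List.count k words : Int))) (PySem.Set.ofList words)) _
    (fun acc p => acc + (if d.contains p.1 then p.2 * d.getD p.1 0 else 0)) 0
    (by intro acc p _; split_ifs with h <;> simp [h])]
  rw [PySem.List.foldl_add, PySem.List.foldl_add, List.map_map]
  congr 1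
  rw [sum_map_eq_sum_dedup_count (fun w => d.getD w 0) words]
  refine congrArg List.sum (List.map_congr_left (fun k _ => ?_))
  by_cases h : d.contains k
  · simp [h]
  · have h0 : d.contains k = false := by simpa using h
    simp [h0, PySem.Dict.getD_of_not_contains _ _ h0]
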